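-- pv_equiv track=rewrite | github.com/lev-misyuk/chess-agent | agent/evaluation.py | _get_king_zone
-- ===== SOURCE A (Python) =====
-- def _get_king_zone(king_square: int) -> int:
--     """Get a bitboard of the 8 squares surrounding the king plus 3 squares in front"""
--     zone = 0
--     rank = king_square >> 3
--     file = king_square & 7
--
--     # Generate zone masks based on king position
--     for r in range(max(0, rank - 1), min(8, rank + 2)):
--         for f in range(max(0, file - 1), min(8, file + 2)):
--             zone |= 1 << (r * 8 + f)
--
--     # Add three squares in front for castled king
--     if rank == 0 or rank == 7:
--         front_rank = 1 if rank == 0 else 6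
--         for f in range(max(0, file - 1), min(8, file + 2)):
--             zone |= 1 << (front_rank * 8 + f)
--
--     return zone
-- ===== SOURCE B (Python) =====
-- def _get_king_zone(king_square: int) -> int:
--     """Bitboard of the king's 3x3 neighbourhood as an intersection of a
--     contiguous rank band and a file band (no loops; the 'front' squares of
--     the original are already inside the band)."""
--     r = king_square >> 3
--     f = king_square & 7
--     r0, r1 = max(0, r - 1), min(8, r + 2)
--     f0, f1 = max(0, f - 1), min(8, f + 2)
--     if r0 >= r1:
--         return 0
--     rank_band = (1 << (8 * r1)) - (1 << (8 * r0))
--     file_band = 0x0101010101010101 * ((1 << f1) - (1 << f0))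
--     return rank_band & file_band
-- ===== Notes on version B (the rewrite author's own statement) =====
-- stated objective: alternative
-- what changed: Replaced the nested rank/file loops and the redundant 'three squares in front' pass by a closed-form computation: the zone is the bitwise AND of a contiguous rank band ((1<<8*r1)-(1<<8*r0)) and a file band (0x0101010101010101*((1<<f1)-(1<<f0))), with no loops at all.
import Mathlib
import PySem

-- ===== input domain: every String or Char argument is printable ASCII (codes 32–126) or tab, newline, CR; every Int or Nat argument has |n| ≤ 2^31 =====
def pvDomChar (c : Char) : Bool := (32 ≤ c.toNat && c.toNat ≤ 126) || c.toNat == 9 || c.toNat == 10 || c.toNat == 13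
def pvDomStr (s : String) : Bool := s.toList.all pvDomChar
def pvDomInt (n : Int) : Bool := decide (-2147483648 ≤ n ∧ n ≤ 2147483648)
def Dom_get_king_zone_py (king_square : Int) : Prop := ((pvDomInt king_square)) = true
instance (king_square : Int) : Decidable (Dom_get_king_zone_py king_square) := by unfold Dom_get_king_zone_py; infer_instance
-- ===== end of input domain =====

-- B replaces A's nested rank/file loops (and the redundant 'front squares' pass) by a
-- closed-form intersection of a rank band and a file band of the bitboard (objective: alternative).


-- ===== PORT A =====
-- literal port of _get_king_zone; the shift exponents r*8+f / front_rank*8+f are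
-- ≥ 0 for every r, f the ranges produce, so '.toNat' on them is exact
def get_king_zone_py (king_square : Int) : Int :=
  let zone : Int := 0
  let rank := king_square >>> 3
  let file := PySem.Int.band king_square 7
  let zone := (PySem.List.pyRange (max 0 (rank - 1)) (min 8 (rank + 2)) 1).foldl
    (fun zone r =>
      (PySem.List.pyRange (max 0 (file - 1)) (min 8 (file + 2)) 1).foldl
        (fun zone f => PySem.Int.bor zone ((1 : Int) <<< (r * 8 + f).toNat)) zone) zone
  if rank = 0 ∨ rank = 7 then
    let front_rank : Int := if rank = 0 then 1 else 6
    (PySem.List.pyRange (max 0 (file - 1)) (min 8 (file + 2)) 1).foldl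
      (fun zone f => PySem.Int.bor zone ((1 : Int) <<< (front_rank * 8 + f).toNat)) zone
  else zone

-- ===== PORT B =====
-- literal port of Source B; the shift exponents 8*r1, 8*r0, f1, f0 are ≥ 0 whenever
-- they are reached, so '.toNat' on them is exact
def get_king_zone_py_alt (king_square : Int) : Int :=
  let r := king_square >>> 3
  let f := PySem.Int.band king_square 7
  let r0 := max 0 (r - 1)
  let r1 := min 8 (r + 2)
  let f0 := max 0 (f - 1)
  let f1 := min 8 (f + 2)
  if r1 ≤ r0 then 0
  else
    let rankBand := (1 : Int) <<< (8 * r1).toNat - (1 : Int) <<< (8 * r0).toNat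
    let fileBand := 0x0101010101010101 * ((1 : Int) <<< f1.toNat - (1 : Int) <<< f0.toNat)
    PySem.Int.band rankBand fileBand

-- ===== PRECONDITION & SPEC =====
def Spec_get_king_zone_py (king_square : Int) (out : Int) : Prop := out = get_king_zone_py_alt king_square
instance (king_square : Int) (out : Int) : Decidable (Spec_get_king_zone_py king_square out) := by unfold Spec_get_king_zone_py; infer_instance

-- ===== CLAIM (what is proved, stated in full; the proofs are below) =====
def Claim_equal_get_king_zone_py : Prop := ∀ (king_square : Int), Dom_get_king_zone_py king_square → Spec_get_king_zone_py king_square (get_king_zone_py king_square)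

-- ===== LEMMAS AND PROOFS =====

theorem band7_bounds (a : Int) : 0 ≤ PySem.Int.band a 7 ∧ PySem.Int.band a 7 ≤ 7 := by
  unfold PySem.Int.band
  split_ifs with h1 h2 h2
  · have := Nat.and_le_right (n := a.toNat) (m := (7 : Int).toNat)
    constructor <;> [exact Int.natCast_nonneg _; omega]
  · omega
  · have : (7 : Int).toNat - ((7 : Int).toNat &&& (-a - 1).toNat) ≤ 7 := by omega
    constructor <;> [exact Int.natCast_nonneg _; omega]
  · omega

-- ===== VERDICT (by name: the statement is the Claim_ definition above) =====
theorem get_king_zone_py_spec : Claim_equal_get_king_zone_py := by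
  intro ks _
  unfold Spec_get_king_zone_py
  obtain ⟨hf0, hf7⟩ := band7_bounds ks
  simp only [get_king_zone_py, get_king_zone_py_alt]
  generalize hF : PySem.Int.band ks 7 = f at hf0 hf7 ⊢
  generalize hR : ks >>> 3 = r
  by_cases hsmall : -1 ≤ r ∧ r ≤ 8
  · obtain ⟨h1, h2⟩ := hsmall
    interval_cases r <;> interval_cases f <;> decide
  · have hnil : PySem.List.pyRange (max 0 (r - 1)) (min 8 (r + 2)) 1 = [] :=
      PySem.List.pyRange_one_eq_nil (by omega)
    rw [hnil, if_neg (by omega), if_pos (by omega)]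
    rfl
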